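/-
  THE CODE OF AN IMAGE AS DATA: per function a byte list, and the step from "the function's bytes are in memory" to "this
  instruction is at RIP" (the hypotheses of the decode bridge, UserX/Decode.lean).

      #code_bytes code_error "554889e5…" "…"      `def code_error : List UInt8` (the strings concatenated), built as a term
                                                  directly (no elaboration of ten thousand numerals), not compiled;
                                                  `def code_error.nat : Nat` the same bytes as ONE little-endian number;
                                                  `theorem code_error.spec : CodeList code_error code_error.nat 41` (kernel);
                                                  the bytes are also kept in `User.codeExt` for meta code
      User.HasCode L u base code                  `CodeAt u.mem base code ∧ L.Has base code.length`: the hypothesis a walker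
                                                  takes for each function it walks through (Frame.lean's `CodeAt`)
      User.HasCodeNat L u base N len              the same said of the number: what a walker works with (`HasCode.toNat`)
      User.HasCodeNat.insn                        … gives `CodeAt u.mem u.rip ins ∧ L.Has u.rip ins.length` for the instruction
                                                  at offset `off`, from `(N >>> (8 * off)) % 2 ^ (8 * n) = leNat ins` — closed
                                                  numbers: ONE big-number operation for the kernel, whatever the offset
      User.Step.of_codeNat                        the step rule from `HasCodeNat`, a decode fact and the body's `wpUser`
      User.HasCode.insn, User.Step.of_code        the same from the list (`(code.drop off).take n = ins`): fine for a small
                                                  function, 0.5 s per instruction near the end of a 12 KB one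
      User.codeBytes? env name                    the bytes of a `#code_bytes` definition
      User.codeInsnAt name off                    the instruction at offset `off`: its length and its decode fact
      #code_sweep code_error                      linear sweep from offset 0: every instruction has a decode fact (made on the
                                                  fly if not imported) and the instructions tile the function exactly

  WHY A NUMBER. The kernel evaluates `List.drop off code` in `off` steps of about 40 µs (12 KB: half a second, for EVERY
  instruction), and the elaborator's `rfl` / `decide` give up on such a list. Shifts and remainders of literals are
  big-number operations of the kernel (and of `Meta.whnf`): microseconds at any offset.

  Addresses are NOT here: `base` is a parameter of every statement, so the same byte list serves wherever the function
  is linked (only the `rel32` of its calls and RIP-relative operands depend on the layout, and they are part of the bytes).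
-/
import UserX.DecodeImage
open Lean Meta Elab Command

namespace X86
namespace User

/-! ### The hypothesis of a walker -/

/-- **The function's bytes are in memory at `base`, inside the user region.** -/
def HasCode (L : Layout) (u : State) (base : Word) (code : List Byte) : Prop :=
  CodeAt u.mem base code ∧ L.Has base code.length

variable {L : Layout} {μ : Microarch} {u : State}

/-- The instruction at offset `off` of a function: its bytes are at RIP, inside the user region. `hins` and `hlen` are
closed terms about the byte list (`rfl`, `by decide`). -/
theorem HasCode.insn {base : Word} {code ins : List Byte} (h : HasCode L u base code) (off : Nat)
    (hrip : u.rip = base + UInt64.ofNat off) (hlen : off + ins.length ≤ code.length)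
    (hins : (code.drop off).take ins.length = ins) :
    CodeAt u.mem u.rip ins ∧ L.Has u.rip ins.length := by
  refine ⟨h.1.at u.rip off ins.length ins hrip hlen hins, ?_⟩
  rw [hrip]
  exact h.2.sub off ins.length hlen

/-- A store that keeps the memory of the code range keeps the hypothesis: `HasCode` depends on the state only through
the bytes of the range. -/
theorem HasCode.congr {u' : State} {base : Word} {code : List Byte} (h : HasCode L u base code)
    (he : ∀ i, i < code.length → u'.mem.read (base + UInt64.ofNat i) = u.mem.read (base + UInt64.ofNat i)) :
    HasCode L u' base code :=
  ⟨h.1.congr he, h.2⟩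

/-- **The step rule from the code of a function**: the instruction at offset `off` is `ins`, its decode fact is `hi`,
and what remains is the body's flat reading from the state with RIP at `next`. -/
theorem Step.of_code {base : Word} {code ins : List Byte} {keep : Machine → Machine → Machine} {len : Word}
    {body : Sem Unit} {n : Nat} {Q : State → Prop} {next : Word}
    (h : HasCode L u base code) (off : Nat)
    (hi : ∀ has, Dec.IsInsn Dec.allCells (decMode has) ins (Sem.instr keep len body) n)
    (hrip : u.rip = base + UInt64.ofNat off) (hlen : off + ins.length ≤ code.length)
    (hins : (code.drop off).take ins.length = ins) (hnext : u.rip + len = next)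
    (hw : ∀ m, Abs L m u → Sem.wpUser L μ body (fun _ u' => Q u') (fun _ _ => False) (u.setRip next)) :
    Step L μ u Q := by
  obtain ⟨hc, hr⟩ := h.insn off hrip hlen hins
  exact Step.of_isInsn_at hi hc hr hnext hw

/-! ### The bytes as one number -/

/-- The bytes as a little-endian number: byte `i` is bits `8 i … 8 i + 7`. -/
def leNat : List Byte → Nat
  | [] => 0
  | b :: bs => b.toNat + 256 * leNat bs

/-- The list `bs` is the number `N`, and has `len` bytes. Checked by the kernel once per function (`#code_bytes`). -/
def CodeList (bs : List Byte) (N len : Nat) : Prop := leNat bs = N ∧ bs.length = len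

/-- Byte `j` of the number of a list is byte `j` of the list. -/
theorem leNat_byte (bs : List Byte) (j : Nat) (h : j < bs.length) : (leNat bs >>> (8 * j)) % 256 = bs[j].toNat := by
  induction bs generalizing j with
  | nil => simp at h
  | cons b bs ih =>
    have hb : b.toNat < 256 := b.toNat_lt
    cases j with
    | zero =>
      simp only [leNat, Nat.mul_zero, Nat.shiftRight_zero, List.getElem_cons_zero]
      omega
    | succ j =>
      have hj : j < bs.length := by simpa using h
      have hshift : (b.toNat + 256 * leNat bs) >>> 8 = leNat bs := by
        rw [Nat.shiftRight_eq_div_pow]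
        omega
      have hsplit : 8 * (j + 1) = 8 + 8 * j := by omega
      simp only [leNat, List.getElem_cons_succ]
      rw [hsplit, Nat.shiftRight_add, hshift]
      exact ih j hj

/-- Byte `j` of a field of `n` bytes cut out of `N` at byte `off` is byte `off + j` of `N`. -/
theorem field_byte (N off n j : Nat) (hj : j < n) :
    (((N >>> (8 * off)) % 2 ^ (8 * n)) >>> (8 * j)) % 256 = (N >>> (8 * (off + j))) % 256 := by
  apply Nat.eq_of_testBit_eq
  intro i
  have h256 : 256 = 2 ^ 8 := rfl
  rw [h256, Nat.testBit_mod_two_pow, Nat.testBit_mod_two_pow, Nat.testBit_shiftRight, Nat.testBit_shiftRight,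
    Nat.testBit_mod_two_pow, Nat.testBit_shiftRight]
  by_cases hi : i < 8
  · have hin : 8 * j + i < 8 * n := by omega
    have hidx : 8 * off + (8 * j + i) = 8 * (off + j) + i := by omega
    simp only [hi, hin, decide_true, Bool.true_and, hidx]
  · simp only [hi, decide_false, Bool.false_and]

/-- The memory `mem` holds at `base` the `len` bytes of the number `N`. -/
def CodeNat (mem : Mem) (base : Word) (N len : Nat) : Prop :=
  ∀ i, i < len → (mem.read (base + UInt64.ofNat i)).toNat = (N >>> (8 * i)) % 256

/-- A byte list in memory is its number in memory. -/
theorem CodeAt.toCodeNat {mem : Mem} {base : Word} {bs : List Byte} {N len : Nat} (h : CodeAt mem base bs)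
    (hl : CodeList bs N len) : CodeNat mem base N len := by
  obtain ⟨hN, hlen⟩ := hl
  subst hN
  subst hlen
  intro i hi
  rw [h i hi]
  exact (leNat_byte bs i hi).symm

/-- **The instruction at byte `off` of a function held as a number**: `hins` compares two closed numbers. -/
theorem CodeNat.insn {mem : Mem} {base : Word} {N len : Nat} (h : CodeNat mem base N len) (off : Nat) (ins : List Byte)
    (hlen : off + ins.length ≤ len) (hins : (N >>> (8 * off)) % 2 ^ (8 * ins.length) = leNat ins) :
    CodeAt mem (base + UInt64.ofNat off) ins := by
  intro j hj
  have hmem := h (off + j) (by omega)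
  have hbyte := leNat_byte ins j hj
  rw [← hins, field_byte N off ins.length j hj] at hbyte
  rw [add_ofNat_add]
  apply UInt8.toNat_inj.mp
  rw [hmem, hbyte]

/-- **The function's bytes, as the number `N`, are in memory at `base`, inside the user region.** -/
def HasCodeNat (L : Layout) (u : State) (base : Word) (N len : Nat) : Prop :=
  CodeNat u.mem base N len ∧ L.Has base len

/-- From the list to the number: once per function, with the `spec` theorem `#code_bytes` proves. -/
theorem HasCode.toNat {base : Word} {code : List Byte} {N len : Nat} (h : HasCode L u base code)
    (hl : CodeList code N len) : HasCodeNat L u base N len := by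
  refine ⟨h.1.toCodeNat hl, ?_⟩
  rw [← hl.2]
  exact h.2

/-- The instruction at offset `off` of a function held as a number: its bytes are at RIP, inside the user region. -/
theorem HasCodeNat.insn {base : Word} {N len : Nat} {ins : List Byte} (h : HasCodeNat L u base N len) (off : Nat)
    (hrip : u.rip = base + UInt64.ofNat off) (hlen : off + ins.length ≤ len)
    (hins : (N >>> (8 * off)) % 2 ^ (8 * ins.length) = leNat ins) :
    CodeAt u.mem u.rip ins ∧ L.Has u.rip ins.length := by
  rw [hrip]
  exact ⟨h.1.insn off ins hlen hins, h.2.sub off ins.length hlen⟩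

/-- **The step rule from the code of a function held as a number.** -/
theorem Step.of_codeNat {base : Word} {N len : Nat} {ins : List Byte} {keep : Machine → Machine → Machine} {w : Word}
    {body : Sem Unit} {n : Nat} {Q : State → Prop} {next : Word}
    (h : HasCodeNat L u base N len) (off : Nat)
    (hi : ∀ has, Dec.IsInsn Dec.allCells (decMode has) ins (Sem.instr keep w body) n)
    (hrip : u.rip = base + UInt64.ofNat off) (hlen : off + ins.length ≤ len)
    (hins : (N >>> (8 * off)) % 2 ^ (8 * ins.length) = leNat ins) (hnext : u.rip + w = next)
    (hw : ∀ m, Abs L m u → Sem.wpUser L μ body (fun _ u' => Q u') (fun _ _ => False) (u.setRip next)) :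
    Step L μ u Q := by
  obtain ⟨hc, hr⟩ := h.insn off hrip hlen hins
  exact Step.of_isInsn_at hi hc hr hnext hw

/-! ### Byte lists of functions -/

/-- The byte lists defined by `#code_bytes`: name of the definition ↦ its bytes. -/
initialize codeExt : SimplePersistentEnvExtension (Name × ByteArray) (Std.HashMap Name ByteArray) ←
  registerSimplePersistentEnvExtension {
    addEntryFn := fun table entry => table.insert entry.1 entry.2
    addImportedFn := fun modules =>
      modules.foldl (init := {}) fun table entries =>
        entries.foldl (init := table) fun table entry => table.insert entry.1 entry.2
  }

/-- The bytes of a `#code_bytes` definition. -/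
def codeBytes? (env : Environment) (name : Name) : Option ByteArray := (codeExt.getState env).get? name

/-- The little-endian number of a byte list (meta side; `leNat` is the same function inside the logic). -/
def leNatOfBytes (bytes : List UInt8) : Nat := bytes.foldr (fun b acc => b.toNat + 256 * acc) 0

/-- `#code_bytes name "hex" "hex" …`: `def name : List UInt8` (the bytes the strings spell, in order), `def name.nat : Nat`
(the same bytes as a little-endian number) and `theorem name.spec : CodeList name name.nat <length>`. -/
elab "#code_bytes " name:ident strings:str* : command => do
  let mut bytes : List UInt8 := []
  for s in strings do
    bytes := bytes ++ (← bytesOfSyntax s)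
  let declName := (← getCurrNamespace) ++ name.getId
  let listType := mkApp (mkConst ``List [Level.zero]) (mkConst ``UInt8)
  let natType := mkConst ``Nat
  let natName := declName.str "nat"
  liftCoreM <| addDecl <| .defnDecl
    { name := declName, levelParams := [], type := listType, value := toExpr bytes
      hints := .regular 0, safety := .safe }
  liftCoreM <| addDecl <| .defnDecl
    { name := natName, levelParams := [], type := natType, value := mkRawNatLit (leNatOfBytes bytes)
      hints := .regular 0, safety := .safe }
  -- the kernel evaluates `leNat` and `List.length` on the literal list, once
  let lenE := mkRawNatLit bytes.length
  let specType := mkApp3 (mkConst ``X86.User.CodeList) (mkConst declName) (mkConst natName) lenE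
  let leftType ← liftTermElabM <| mkEq (mkApp (mkConst ``X86.User.leNat) (mkConst declName)) (mkConst natName)
  let rightType ← liftTermElabM <| mkEq (mkApp2 (mkConst ``List.length [Level.zero]) (mkConst ``UInt8) (mkConst declName)) lenE
  let leftProof := mkApp2 (mkConst ``Eq.refl [Level.one]) natType (mkConst natName)
  let rightProof := mkApp2 (mkConst ``Eq.refl [Level.one]) natType lenE
  let specProof := mkApp4 (mkConst ``And.intro) leftType rightType leftProof rightProof
  liftCoreM <| addDecl <| .thmDecl
    { name := declName.str "spec", levelParams := [], type := specType, value := specProof }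
  modifyEnv fun env => codeExt.addEntry env (declName, ByteArray.mk bytes.toArray)

/-- The instruction at offset `off` of the function `name`: its length and its decode fact (imported, or made now). -/
def codeInsnAt (name : Name) (off : Nat) : MetaM (Nat × Name) := do
  let some bytes := codeBytes? (← getEnv) name | throwError "not a #code_bytes definition: {name}"
  unless off < bytes.size do throwError "{name}: offset {off} is outside the {bytes.size} bytes"
  let cand := (bytes.extract off (off + 15)).toList
  decodeFactAt cand

/-- `#code_sweep name`: decode the function from offset 0 to its end. Reports the number of instructions; an error if
some bytes do not decode or the last instruction runs over the end. -/
elab "#code_sweep " name:ident : command => do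
  let declName ← liftCoreM <| realizeGlobalConstNoOverloadWithInfo name
  let some bytes := codeBytes? (← getEnv) declName | throwError "not a #code_bytes definition: {declName}"
  let mut off : Nat := 0
  let mut count : Nat := 0
  let mut offsets : Array Nat := #[]
  while off < bytes.size do
    let (len, _) ← liftTermElabM <| withCurrHeartbeats <| codeInsnAt declName off
    if off + len > bytes.size then
      throwError "{declName}: the instruction at offset {off} ({len} bytes) runs over the end ({bytes.size} bytes)"
    offsets := offsets.push off
    count := count + 1
    off := off + len
  logInfo m!"{declName}: {bytes.size} bytes, {count} instructions at offsets {offsets}"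

end User
end X86
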